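-- pv_equiv track=rewrite | github.com/YukihiroSM/logika_statistics | library.py | get_business_by_group_course_id
-- ===== SOURCE A (Python) =====
-- COURSES_IDS = {
--     "programming": {
--         "python start": [2066, 1765, 1600, 1493, 853, 816, 796, 733, 706, 686, 683, 633, 410, 406, 361, 305, 277, 248],
--         "python pro": [2120, 2051, 1996, 1554, 1459, 854, 817, 783, 734, 405, 389, 2120],
--         "scratch": [810, 799, 582, 563, 468, 467, 466, 390, 385, ],
--         "gamedesign": [1962, 1948, 1602, 1601, 1371, 902, 901, 809, 707,  2299],
--         "graphdesign": [2078, 1995, 1543, 1484, 1387, ],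
--         "websites": [1957, 1818, 1604, 1603, 797, 716,2298 ],
--         "comp_gram": [1398, 897, 896, 777, 729, 606, 603, 465, 417, 408, ],
--         "video_blogging": [1571, 1570, 1386, ],
--         "unity": [1710, 1688, 1686, ]
--     },
--     "english": [2184, 2069, 2054, 1865, 1864, 1833, 1825, 1809, 1805, 2333, 2292, 2184]
-- }
--
-- def get_business_by_group_course_id(lms_course):
--     if lms_course in COURSES_IDS["english"]:
--         return "english"
--     else:
--         for key in COURSES_IDS["programming"]:
--             if lms_course in COURSES_IDS["programming"][key]:
--                 return "programming"
--     return "unknown"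
-- ===== SOURCE B (Python) =====
-- # Flat lookup table: one dict from course id to business category (programming ids
-- # first, then english; the two groups share no id), replacing A's nested scans with
-- # a single O(1) dict lookup.
-- _CATEGORY = {
--     2066: "programming",
--     1765: "programming",
--     1600: "programming",
--     1493: "programming",
--     853: "programming",
--     816: "programming",
--     796: "programming",
--     733: "programming",
--     706: "programming",
--     686: "programming",
--     683: "programming",
--     633: "programming",
--     410: "programming",
--     406: "programming",
--     361: "programming",
--     305: "programming",
--     277: "programming",
--     248: "programming",
--     2120: "programming",
--     2051: "programming",
--     1996: "programming",
--     1554: "programming",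
--     1459: "programming",
--     854: "programming",
--     817: "programming",
--     783: "programming",
--     734: "programming",
--     405: "programming",
--     389: "programming",
--     810: "programming",
--     799: "programming",
--     582: "programming",
--     563: "programming",
--     468: "programming",
--     467: "programming",
--     466: "programming",
--     390: "programming",
--     385: "programming",
--     1962: "programming",
--     1948: "programming",
--     1602: "programming",
--     1601: "programming",
--     1371: "programming",
--     902: "programming",
--     901: "programming",
--     809: "programming",
--     707: "programming",
--     2299: "programming",
--     2078: "programming",
--     1995: "programming",
--     1543: "programming",
--     1484: "programming",
--     1387: "programming",
--     1957: "programming",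
--     1818: "programming",
--     1604: "programming",
--     1603: "programming",
--     797: "programming",
--     716: "programming",
--     2298: "programming",
--     1398: "programming",
--     897: "programming",
--     896: "programming",
--     777: "programming",
--     729: "programming",
--     606: "programming",
--     603: "programming",
--     465: "programming",
--     417: "programming",
--     408: "programming",
--     1571: "programming",
--     1570: "programming",
--     1386: "programming",
--     1710: "programming",
--     1688: "programming",
--     1686: "programming",
--     2184: "english",
--     2069: "english",
--     2054: "english",
--     1865: "english",
--     1864: "english",
--     1833: "english",
--     1825: "english",
--     1809: "english",
--     1805: "english",
--     2333: "english",
--     2292: "english",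
-- }
--
-- def get_business_by_group_course_id(lms_course):
--     return _CATEGORY.get(lms_course, "unknown")
-- ===== Notes on version B (the rewrite author's own statement) =====
-- stated objective: idiomatic
-- what changed: Replaces the english-check plus per-category membership scans by one flat literal id-to-category table (the two id groups are disjoint) queried with a single dict .get with 'unknown' default.
import Mathlib
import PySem

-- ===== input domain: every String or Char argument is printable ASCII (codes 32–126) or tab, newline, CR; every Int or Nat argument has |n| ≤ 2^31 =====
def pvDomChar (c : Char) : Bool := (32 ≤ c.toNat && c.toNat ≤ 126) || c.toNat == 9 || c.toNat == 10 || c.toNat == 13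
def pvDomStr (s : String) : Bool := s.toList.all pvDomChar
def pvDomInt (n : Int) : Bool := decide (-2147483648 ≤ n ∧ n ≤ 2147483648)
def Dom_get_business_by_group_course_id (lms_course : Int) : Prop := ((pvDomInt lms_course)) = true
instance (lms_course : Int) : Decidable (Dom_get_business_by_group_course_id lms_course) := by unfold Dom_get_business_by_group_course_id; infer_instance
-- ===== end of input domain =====

-- B replaces A's english-then-per-category membership scans by one flat literal
-- id->category table looked up once with a default (return value only; idiomatic).


-- ===== PORT A =====
def pvProgramming : List (String × List Int) :=
  [("python start", [2066, 1765, 1600, 1493, 853, 816, 796, 733, 706, 686, 683, 633, 410, 406, 361, 305, 277, 248]),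
   ("python pro", [2120, 2051, 1996, 1554, 1459, 854, 817, 783, 734, 405, 389, 2120]),
   ("scratch", [810, 799, 582, 563, 468, 467, 466, 390, 385]),
   ("gamedesign", [1962, 1948, 1602, 1601, 1371, 902, 901, 809, 707, 2299]),
   ("graphdesign", [2078, 1995, 1543, 1484, 1387]),
   ("websites", [1957, 1818, 1604, 1603, 797, 716, 2298]),
   ("comp_gram", [1398, 897, 896, 777, 729, 606, 603, 465, 417, 408]),
   ("video_blogging", [1571, 1570, 1386]),
   ("unity", [1710, 1688, 1686])]

def pvEnglish : List Int := [2184, 2069, 2054, 1865, 1864, 1833, 1825, 1809, 1805, 2333, 2292, 2184]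

-- A's for-loop over the keys of COURSES_IDS["programming"] with early return
def pvLoopA (lms_course : Int) : List (String × List Int) → String
  | [] => "unknown"
  | kv :: rest => if kv.2.contains lms_course then "programming" else pvLoopA lms_course rest

def get_business_by_group_course_id (lms_course : Int) : String :=
  if pvEnglish.contains lms_course then "english"
  else pvLoopA lms_course pvProgramming

-- ===== PORT B =====
-- Source B's module-level literal table _CATEGORY: a Python dict literal is the empty
-- dict with its entries inserted in order, ported entry for entry
def pvCategory : PySem.Dict Int String :=
  PySem.Dict.empty
    |>.insert 2066 "programming"
    |>.insert 1765 "programming"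
    |>.insert 1600 "programming"
    |>.insert 1493 "programming"
    |>.insert 853 "programming"
    |>.insert 816 "programming"
    |>.insert 796 "programming"
    |>.insert 733 "programming"
    |>.insert 706 "programming"
    |>.insert 686 "programming"
    |>.insert 683 "programming"
    |>.insert 633 "programming"
    |>.insert 410 "programming"
    |>.insert 406 "programming"
    |>.insert 361 "programming"
    |>.insert 305 "programming"
    |>.insert 277 "programming"
    |>.insert 248 "programming"
    |>.insert 2120 "programming"
    |>.insert 2051 "programming"
    |>.insert 1996 "programming"
    |>.insert 1554 "programming"
    |>.insert 1459 "programming"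
    |>.insert 854 "programming"
    |>.insert 817 "programming"
    |>.insert 783 "programming"
    |>.insert 734 "programming"
    |>.insert 405 "programming"
    |>.insert 389 "programming"
    |>.insert 810 "programming"
    |>.insert 799 "programming"
    |>.insert 582 "programming"
    |>.insert 563 "programming"
    |>.insert 468 "programming"
    |>.insert 467 "programming"
    |>.insert 466 "programming"
    |>.insert 390 "programming"
    |>.insert 385 "programming"
    |>.insert 1962 "programming"
    |>.insert 1948 "programming"
    |>.insert 1602 "programming"
    |>.insert 1601 "programming"
    |>.insert 1371 "programming"
    |>.insert 902 "programming"
    |>.insert 901 "programming"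
    |>.insert 809 "programming"
    |>.insert 707 "programming"
    |>.insert 2299 "programming"
    |>.insert 2078 "programming"
    |>.insert 1995 "programming"
    |>.insert 1543 "programming"
    |>.insert 1484 "programming"
    |>.insert 1387 "programming"
    |>.insert 1957 "programming"
    |>.insert 1818 "programming"
    |>.insert 1604 "programming"
    |>.insert 1603 "programming"
    |>.insert 797 "programming"
    |>.insert 716 "programming"
    |>.insert 2298 "programming"
    |>.insert 1398 "programming"
    |>.insert 897 "programming"
    |>.insert 896 "programming"
    |>.insert 777 "programming"
    |>.insert 729 "programming"
    |>.insert 606 "programming"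
    |>.insert 603 "programming"
    |>.insert 465 "programming"
    |>.insert 417 "programming"
    |>.insert 408 "programming"
    |>.insert 1571 "programming"
    |>.insert 1570 "programming"
    |>.insert 1386 "programming"
    |>.insert 1710 "programming"
    |>.insert 1688 "programming"
    |>.insert 1686 "programming"
    |>.insert 2184 "english"
    |>.insert 2069 "english"
    |>.insert 2054 "english"
    |>.insert 1865 "english"
    |>.insert 1864 "english"
    |>.insert 1833 "english"
    |>.insert 1825 "english"
    |>.insert 1809 "english"
    |>.insert 1805 "english"
    |>.insert 2333 "english"
    |>.insert 2292 "english"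

def get_business_by_group_course_id_alt (lms_course : Int) : String :=
  pvCategory.getD lms_course "unknown"

-- ===== PRECONDITION & SPEC =====
def Spec_get_business_by_group_course_id (lms_course : Int) (out : String) : Prop := out = get_business_by_group_course_id_alt lms_course
instance (lms_course : Int) (out : String) : Decidable (Spec_get_business_by_group_course_id lms_course out) := by unfold Spec_get_business_by_group_course_id; infer_instance

-- ===== CLAIM (what is proved, stated in full; the proofs are below) =====
def Claim_equal_get_business_by_group_course_id : Prop := ∀ (lms_course : Int), Dom_get_business_by_group_course_id lms_course → Spec_get_business_by_group_course_id lms_course (get_business_by_group_course_id lms_course)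

-- ===== LEMMAS AND PROOFS =====
def pvAllIds : List Int := pvEnglish ++ (pvProgramming.map Prod.snd).flatten

theorem pvLoopA_unknown (x : Int) (l : List (String × List Int))
    (h : ∀ kv ∈ l, x ∉ kv.2) : pvLoopA x l = "unknown" := by
  induction l with
  | nil => rfl
  | cons kv rest ih =>
    have hc : kv.2.contains x = false := by
      simp only [List.contains_eq_mem, decide_eq_false_iff_not]
      exact h kv (List.mem_cons_self ..)
    simp only [pvLoopA, hc, Bool.false_eq_true, if_false]
    exact ih fun p hp => h p (List.mem_cons_of_mem _ hp)

set_option maxRecDepth 40000 in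
theorem pvCategory_keys_sub : ∀ y ∈ pvCategory.keys, y ∈ pvAllIds := by decide

-- ===== VERDICT (by name: the statement is the Claim_ definition above) =====
set_option maxRecDepth 8192 in
theorem get_business_by_group_course_id_spec : Claim_equal_get_business_by_group_course_id := by
  intro x _
  unfold Spec_get_business_by_group_course_id
  by_cases h : x ∈ pvAllIds
  · fin_cases h <;> decide
  · have hE : x ∉ pvEnglish := fun m => h (List.mem_append_left _ m)
    have hP : ∀ kv ∈ pvProgramming, x ∉ kv.2 := fun kv hkv m =>
      h (List.mem_append_right _ (List.mem_flatten.2 ⟨kv.2, List.mem_map_of_mem hkv, m⟩))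
    have hcE : pvEnglish.contains x = false := by
      simp only [List.contains_eq_mem, decide_eq_false_iff_not]; exact hE
    have hk : x ∉ pvCategory.keys := fun m => h (pvCategory_keys_sub x m)
    rw [get_business_by_group_course_id, get_business_by_group_course_id_alt, hcE]
    simp only [Bool.false_eq_true, if_false]
    rw [pvLoopA_unknown _ _ hP,
      PySem.Dict.getD_of_not_contains _ _
        (by rw [PySem.Dict.contains_eq_decide_mem_keys]; exact decide_eq_false hk)]
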